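-- pv_equiv track=rewrite | github.com/ColorSeth22/CodingProblemsSolved | Python/CodeWars/move_zeros_to_end.py | get_min_base
-- ===== SOURCE A (Python) =====
-- import math
--
-- def get_min_base(number):
--     # geometric sequence approach
--     for k in range(int(math.log2(number)) + 1, 0, -1):
--         low = 2
--         high = number
--         while low <= high:
--             # utilize binary search, not fun
--             mid = (low + high) // 2
--             total = 0
--             for i in range(k + 1):
--                 # geometric sequence to find total
--                 total = total * mid + 1
--                 if total > number:
--                     break
--             if total == number:
--                 # return lowest base
--                 return mid
--             elif total < number:
--                 # move the left pointer to the middle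
--                 low = mid + 1
--             else:
--                 # move the right pointer to the middle
--                 high = mid - 1
-- ===== SOURCE B (Python) =====
-- def get_min_base(number):
--     # scan candidate bases ascending; a repunit with >= 3 digits forces b*b < number,
--     # and the only 2-digit repunit base is number-1, the fallback.
--     b = 2
--     while b * b < number:
--         n = number
--         while n > 0:
--             if n % b != 1:
--                 break
--             n //= b
--         else:
--             return b
--         b += 1
--     return number - 1 if number >= 3 else None
-- ===== Notes on version B (the rewrite author's own statement) =====
-- stated objective: simpler
-- what changed: Replaced the descending loop over digit counts with a binary search per count by a single ascending scan of candidate bases b with b*b < number, testing repunit-ness by the digit method (every base-b digit must be 1), falling back to number-1 (the 2-digit repunit base) when no smaller base works.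
-- outside the precondition, e.g. on get_min_base(0): A raises ValueError, B returns None
import Mathlib
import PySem

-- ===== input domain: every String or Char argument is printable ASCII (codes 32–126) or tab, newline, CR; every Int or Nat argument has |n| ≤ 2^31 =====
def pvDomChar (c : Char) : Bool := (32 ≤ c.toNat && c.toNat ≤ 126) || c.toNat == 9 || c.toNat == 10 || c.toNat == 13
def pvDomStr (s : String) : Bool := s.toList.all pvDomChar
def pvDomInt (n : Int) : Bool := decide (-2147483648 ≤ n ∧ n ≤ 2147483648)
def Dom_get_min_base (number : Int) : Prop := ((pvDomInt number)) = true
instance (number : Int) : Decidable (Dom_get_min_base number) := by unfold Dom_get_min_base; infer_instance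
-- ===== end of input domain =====

-- B replaces A's descending digit-count loop with an inner binary search by one ascending scan of
-- candidate bases b (with b*b < number) using the digit method, falling back to number-1 (simpler).

-- ===== PORT A =====
-- inner `for i in range(k+1): total = total*mid + 1; if total > number: break`
-- (range(k+1) has (k+1).toNat elements)
def aTotal : Nat → Int → Int → Int → Int
  | 0, _, _, total => total
  | s+1, mid, number, total =>
    if total * mid + 1 > number then total * mid + 1
    else aTotal s mid number (total * mid + 1)

-- `while low <= high:` binary search; the fuel only makes the loop a total function
-- (it is never exhausted for the fuel supplied at the call site)
def aSearch : Nat → Int → Int → Int → Int → Option Int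
  | 0, _, _, _, _ => none
  | fuel+1, k, low, high, number =>
    if low ≤ high then
      if aTotal (k+1).toNat (PySem.Int.floordiv (low + high) 2) number 0 = number then
        some (PySem.Int.floordiv (low + high) 2)
      else if aTotal (k+1).toNat (PySem.Int.floordiv (low + high) 2) number 0 < number then
        aSearch fuel k (PySem.Int.floordiv (low + high) 2 + 1) high number
      else
        aSearch fuel k low (PySem.Int.floordiv (low + high) 2 - 1) number
    else none

-- `for k in range(int(math.log2(number)) + 1, 0, -1):` with the early `return mid`
def aOuter (number : Int) : List Int → Option Int
  | [] => none
  | k :: ks =>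
    match aSearch (number.toNat + 2) k 2 number number with
    | some m => some m
    | none => aOuter number ks

-- int(math.log2(number)) is ported as Nat.log2 number.toNat, exact for 1 ≤ number ≤ 2^31
def get_min_base (number : Int) : Option Int :=
  aOuter number (PySem.List.pyRange ((Nat.log2 number.toNat : Int) + 1) 0 (-1))

-- ===== PORT B =====
-- inner `while n > 0: if n % b != 1: break ; n //= b / else: return b` as a Bool (true = no break)
def bCheck : Nat → Int → Int → Bool
  | 0, _, _ => true
  | fuel+1, n, b =>
    if n > 0 then
      if PySem.Int.mod n b ≠ 1 then false
      else bCheck fuel (PySem.Int.floordiv n b) b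
    else true

-- outer `while b * b < number:` scan; fuel again only for totality
def bLoop : Nat → Int → Int → Option Int
  | 0, _, _ => none
  | fuel+1, b, number =>
    if b * b < number then
      if bCheck (number.toNat + 1) number b then some b
      else bLoop fuel (b+1) number
    else if 3 ≤ number then some (number - 1) else none

def get_min_base_alt (number : Int) : Option Int := bLoop (number.toNat + 2) 2 number

-- ===== PRECONDITION & SPEC =====
-- Pre_ excludes number ≤ 0, on which A raises ValueError (math.log2 of a non-positive number).
def Pre_get_min_base (number : Int) : Prop := 1 ≤ number
instance (number : Int) : Decidable (Pre_get_min_base number) := by unfold Pre_get_min_base; infer_instance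
def pvWitness_get_min_base : Int := 7

def Spec_get_min_base (number : Int) (out : Option Int) : Prop := out = get_min_base_alt number
instance (number : Int) (out : Option Int) : Decidable (Spec_get_min_base number out) := by unfold Spec_get_min_base; infer_instance

-- ===== CLAIM (what is proved, stated in full; the proofs are below) =====
def Claim_equal_get_min_base : Prop := ∀ (number : Int), Dom_get_min_base number → Pre_get_min_base number → Spec_get_min_base number (get_min_base number)

-- ===== LEMMAS AND PROOFS =====

-- G m b = the m-digit repunit in base b (0 digits = 0)
def G : Nat → Int → Int
  | 0, _ => 0
  | m+1, b => G m b * b + 1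

theorem G_nonneg {b : Int} (hb : 0 ≤ b) (m : Nat) : 0 ≤ G m b := by
  induction m with
  | zero => simp [G]
  | succ m ih => simp only [G]; nlinarith

theorem G_pos {b : Int} (hb : 0 ≤ b) {m : Nat} (hm : 1 ≤ m) : 1 ≤ G m b := by
  obtain ⟨m', rfl⟩ : ∃ m', m = m' + 1 := ⟨m - 1, by omega⟩
  have h := G_nonneg hb m'
  simp only [G]
  nlinarith

theorem G_succ_top (m : Nat) (b : Int) : G (m+1) b = b ^ m + G m b := by
  induction m with
  | zero => simp [G]
  | succ m ih =>
    have h2 : G (m+1) b = G m b * b + 1 := rfl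
    calc G (m+2) b = G (m+1) b * b + 1 := rfl
      _ = (b ^ m + G m b) * b + 1 := by rw [ih]
      _ = b ^ (m+1) + (G m b * b + 1) := by ring
      _ = b ^ (m+1) + G (m+1) b := by rw [h2]

theorem G_lt_succ {b : Int} (hb : 1 ≤ b) (m : Nat) : G m b < G (m+1) b := by
  have h0 := G_nonneg (by omega : (0:Int) ≤ b) m
  have h : G (m+1) b = G m b * b + 1 := rfl
  nlinarith

theorem G_le_m {b : Int} (hb : 1 ≤ b) {m m' : Nat} (h : m ≤ m') : G m b ≤ G m' b := by
  induction m', h using Nat.le_induction with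
  | base => exact le_refl _
  | succ n hn ih => exact le_trans ih (le_of_lt (G_lt_succ hb n))

theorem G_mono_b {b b' : Int} (hb : 0 ≤ b) (hbb : b ≤ b') (m : Nat) : G m b ≤ G m b' := by
  induction m with
  | zero => simp [G]
  | succ m ih =>
    have h1 := G_nonneg hb m
    simp only [G]
    nlinarith

theorem G_strict_b {b b' : Int} (hb : 0 ≤ b) (hbb : b < b') {m : Nat} (hm : 2 ≤ m) :
    G m b < G m b' := by
  obtain ⟨m', rfl⟩ : ∃ m', m = m' + 1 := ⟨m - 1, by omega⟩
  have h1 : 1 ≤ G m' b := G_pos hb (by omega)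
  have h2 : G m' b ≤ G m' b' := G_mono_b hb (le_of_lt hbb) m'
  simp only [G]
  nlinarith

theorem G_two (b : Int) : G 2 b = b + 1 := by simp [G]

theorem G_pow2 (m : Nat) : G m 2 = 2 ^ m - 1 := by
  induction m with
  | zero => simp [G]
  | succ m ih => simp only [G]; rw [ih]; ring

theorem G_emod {b : Int} (hb : 2 ≤ b) (m : Nat) : G (m+1) b % b = 1 := by
  have h : G (m+1) b = 1 + b * G m b := by simp only [G]; ring
  rw [h, Int.add_mul_emod_self_left, Int.emod_eq_of_lt (by omega) (by omega)]

theorem G_ediv {b : Int} (hb : 2 ≤ b) (m : Nat) : G (m+1) b / b = G m b := by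
  have h : G (m+1) b = 1 + G m b * b := by simp only [G]; ring
  rw [h, Int.add_mul_ediv_right 1 (G m b) (show b ≠ 0 by omega),
    Int.ediv_eq_zero_of_lt (by omega) (by omega)]
  ring

theorem bCheck_iff {b : Int} (hb : 2 ≤ b) :
    ∀ fuel (n : Int), 0 ≤ n → n.toNat < fuel →
      (bCheck fuel n b = true ↔ ∃ m, G m b = n) := by
  intro fuel
  induction fuel with
  | zero => intro n _ h; omega
  | succ fuel ih =>
    intro n hn hf
    simp only [bCheck, PySem.Int.mod_eq_emod_of_pos (show (0:Int) < b by omega),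
      PySem.Int.floordiv_eq_ediv_of_pos (show (0:Int) < b by omega)]
    by_cases hpos : n > 0
    · rw [if_pos hpos]
      by_cases hm1 : n % b = 1
      · rw [if_neg (by simp [hm1])]
        have hid := Int.mul_ediv_add_emod n b
        have hq0 : 0 ≤ n / b := Int.ediv_nonneg hn (by omega)
        have hqlt : n / b < n := by nlinarith [hid]
        rw [ih (n / b) hq0 (by omega)]
        constructor
        · rintro ⟨m, hm⟩
          refine ⟨m + 1, ?_⟩
          have h : G (m+1) b = G m b * b + 1 := rfl
          have hid' : n / b * b + n % b = n := by rw [mul_comm]; exact hid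
          rw [h, hm]
          omega
        · rintro ⟨m, hm⟩
          match m with
          | 0 => exfalso; simp [G] at hm; omega
          | m+1 =>
            refine ⟨m, ?_⟩
            rw [← hm, G_ediv hb]
      · rw [if_pos (by simp [hm1])]
        constructor
        · intro h; exact absurd h (by simp)
        · rintro ⟨m, hm⟩
          exfalso
          match m with
          | 0 => simp [G] at hm; omega
          | m+1 => exact hm1 (by rw [← hm]; exact G_emod hb m)
    · rw [if_neg hpos]
      have hn0 : n = 0 := by omega
      subst hn0
      exact iff_of_true rfl ⟨0, rfl⟩

-- pure inner iteration (no break)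
def I : Nat → Int → Int → Int
  | 0, _, t => t
  | s+1, mid, t => I s mid (t * mid + 1)

theorem I_le {mid : Int} (hm : 1 ≤ mid) : ∀ s (t : Int), 0 ≤ t → t ≤ I s mid t := by
  intro s
  induction s with
  | zero => intro t _; simp [I]
  | succ s ih =>
    intro t ht
    have h1 : t ≤ t * mid + 1 := by nlinarith
    have h2 : (0:Int) ≤ t * mid + 1 := by nlinarith
    exact le_trans h1 (ih _ h2)

theorem I_eq (mid : Int) : ∀ s (t : Int), I s mid t = t * mid ^ s + G s mid := by
  intro s
  induction s with
  | zero => intro t; simp [I, G]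
  | succ s ih =>
    intro t
    show I s mid (t * mid + 1) = t * mid ^ (s+1) + G (s+1) mid
    rw [ih, G_succ_top]
    ring

theorem aTotal_tri {mid : Int} (hm : 1 ≤ mid) (number : Int) :
    ∀ s (t : Int), 0 ≤ t →
      ((aTotal s mid number t = number ↔ I s mid t = number) ∧
       (aTotal s mid number t < number ↔ I s mid t < number)) := by
  intro s
  induction s with
  | zero => intro t _; exact ⟨Iff.rfl, Iff.rfl⟩
  | succ s ih =>
    intro t ht
    have ht' : (0:Int) ≤ t * mid + 1 := by nlinarith
    simp only [aTotal]
    show ((if t * mid + 1 > number then t * mid + 1 else aTotal s mid number (t * mid + 1)) = number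
            ↔ I s mid (t * mid + 1) = number) ∧
         ((if t * mid + 1 > number then t * mid + 1 else aTotal s mid number (t * mid + 1)) < number
            ↔ I s mid (t * mid + 1) < number)
    by_cases hbreak : t * mid + 1 > number
    · rw [if_pos hbreak]
      have hI : t * mid + 1 ≤ I s mid (t * mid + 1) := I_le hm s _ ht'
      constructor <;> constructor <;> intro h <;> omega
    · rw [if_neg hbreak]
      exact ih _ ht'

theorem aSearch_iff {number k : Int} (hk : 1 ≤ k) :
    ∀ fuel (low high : Int), 2 ≤ low → high ≤ number → (high + 1 - low).toNat < fuel →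
      (∀ c : Int, 2 ≤ c → c ≤ number → G (k+1).toNat c = number → low ≤ c ∧ c ≤ high) →
      ∀ b : Int, (aSearch fuel k low high number = some b ↔
        (2 ≤ b ∧ b ≤ number ∧ G (k+1).toNat b = number)) := by
  intro fuel
  induction fuel with
  | zero => intro low high _ _ h _ b; omega
  | succ fuel ih =>
    intro low high hlow hhigh hfuel hinv b
    have hs2 : 2 ≤ (k+1).toNat := by omega
    simp only [aSearch]
    by_cases hlh : low ≤ high
    · rw [if_pos hlh]
      obtain ⟨hm1, hm2⟩ := PySem.Int.floordiv_two_mid_bounds hlh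
      have hmid1 : (1:Int) ≤ PySem.Int.floordiv (low + high) 2 := by omega
      have tri := aTotal_tri hmid1 number (k+1).toNat 0 le_rfl
      rw [I_eq, zero_mul, zero_add] at tri
      rcases lt_trichotomy (G (k+1).toNat (PySem.Int.floordiv (low + high) 2)) number
        with hlt | heq | hgt
      · have h1 : aTotal (k+1).toNat (PySem.Int.floordiv (low + high) 2) number 0 < number :=
          tri.2.mpr hlt
        rw [if_neg (by omega), if_pos h1]
        apply ih _ high (by omega) hhigh (by omega)
        intro c hc2 hcn hGc
        obtain ⟨hcl, hch⟩ := hinv c hc2 hcn hGc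
        refine ⟨?_, hch⟩
        by_contra hcon
        have hle : c ≤ PySem.Int.floordiv (low + high) 2 := by omega
        have := G_mono_b (by omega : (0:Int) ≤ c) hle (k+1).toNat
        omega
      · rw [if_pos (tri.1.mpr heq)]
        constructor
        · intro h
          have hbm : PySem.Int.floordiv (low + high) 2 = b := by
            injection h
          rw [← hbm]
          exact ⟨by omega, by omega, heq⟩
        · rintro ⟨hb2, hbn, hGb⟩
          have hbeq : b = PySem.Int.floordiv (low + high) 2 := by
            rcases lt_trichotomy b (PySem.Int.floordiv (low + high) 2) with h | h | h
            · have := G_strict_b (by omega : (0:Int) ≤ b) h hs2; omega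
            · exact h
            · have := G_strict_b (by omega : (0:Int) ≤ PySem.Int.floordiv (low + high) 2) h hs2
              omega
          rw [hbeq]
      · have hne : aTotal (k+1).toNat (PySem.Int.floordiv (low + high) 2) number 0 ≠ number := by
          intro h; have := tri.1.mp h; omega
        have hnlt : ¬ aTotal (k+1).toNat (PySem.Int.floordiv (low + high) 2) number 0 < number := by
          intro h; have := tri.2.mp h; omega
        rw [if_neg hne, if_neg hnlt]
        apply ih low _ hlow (by omega) (by omega)
        intro c hc2 hcn hGc
        obtain ⟨hcl, hch⟩ := hinv c hc2 hcn hGc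
        refine ⟨hcl, ?_⟩
        by_contra hcon
        have hge : PySem.Int.floordiv (low + high) 2 ≤ c := by omega
        have := G_mono_b (by omega : (0:Int) ≤ PySem.Int.floordiv (low + high) 2) hge (k+1).toNat
        omega
    · rw [if_neg hlh]
      constructor
      · intro h; exact absurd h (by simp)
      · rintro ⟨hb2, hbn, hGb⟩
        have := hinv b hb2 hbn hGb
        omega

theorem case3 {number : Int} (h3 : 3 ≤ number) :
    get_min_base number = get_min_base_alt number := by
  haveI : DecidablePred (fun c : Nat => 2 ≤ (c:Int) ∧ ∃ m : Nat, 2 ≤ m ∧ G m (c:Int) = number) :=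
    fun _ => Classical.dec _
  have hwitP : 2 ≤ (((number-1).toNat : Nat) : Int) ∧
      ∃ m : Nat, 2 ≤ m ∧ G m (((number-1).toNat : Nat) : Int) = number := by
    rw [Int.toNat_of_nonneg (by omega)]
    exact ⟨by omega, 2, le_rfl, by rw [G_two]; omega⟩
  have hwit : ∃ c : Nat, 2 ≤ (c:Int) ∧ ∃ m : Nat, 2 ≤ m ∧ G m (c:Int) = number :=
    ⟨(number-1).toNat, hwitP⟩
  obtain ⟨hb2, m0, hm02, hGm0⟩ := Nat.find_spec hwit
  have hmin : ∀ c : Int, 2 ≤ c → (∃ m : Nat, 2 ≤ m ∧ G m c = number) →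
      ((Nat.find hwit : Nat) : Int) ≤ c := by
    intro c hc2 hrep
    have hct : ((c.toNat : Nat) : Int) = c := Int.toNat_of_nonneg (by omega)
    have h := Nat.find_min' hwit (m := c.toNat) (by rw [hct]; exact ⟨hc2, hrep⟩)
    omega
  have hble : ((Nat.find hwit : Nat) : Int) ≤ number - 1 := by
    have h := Nat.find_min' hwit (m := (number-1).toNat) hwitP
    omega
  have hmax : ∀ (c : Int) (m : Nat), 2 ≤ c → 2 ≤ m → G m c = number → m ≤ m0 := by
    intro c m hc2 hm2 hGc
    by_contra hcon
    have h1 : ((Nat.find hwit : Nat) : Int) ≤ c := hmin c hc2 ⟨m, hm2, hGc⟩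
    have h2 : G m ((Nat.find hwit : Nat) : Int) ≤ G m c := G_mono_b (by omega) h1 m
    have h3' : G (m0+1) ((Nat.find hwit : Nat) : Int) ≤ G m ((Nat.find hwit : Nat) : Int) :=
      G_le_m (by omega) (by omega)
    have h4 : G m0 ((Nat.find hwit : Nat) : Int) < G (m0+1) ((Nat.find hwit : Nat) : Int) :=
      G_lt_succ (by omega) m0
    omega
  -- ===== A returns some bmin =====
  have hA : get_min_base number = some ((Nat.find hwit : Nat) : Int) := by
    unfold get_min_base
    have hK : (m0:Int) - 1 ≤ ((Nat.log2 number.toNat : Nat) : Int) + 1 := by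
      have h2m : G m0 2 ≤ G m0 ((Nat.find hwit : Nat) : Int) := G_mono_b (by omega) (by omega) m0
      rw [G_pow2, hGm0] at h2m
      have hpow : ((2^m0 : Nat) : Int) = (2:Int)^m0 := by push_cast; ring
      have hN : (2:Nat) ^ m0 ≤ number.toNat + 1 := by omega
      have hsplit : (2:Nat) ^ (m0-1) * 2 = 2 ^ m0 := by
        rw [← pow_succ]; congr 1; omega
      have hx1 : 1 ≤ (2:Nat) ^ (m0-1) := Nat.one_le_two_pow
      have hle : (2:Nat) ^ (m0-1) ≤ number.toNat := by omega
      have := (Nat.le_log2 (n := number.toNat) (by omega)).mpr hle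
      omega
    have main : ∀ d : Nat, ∀ K : Int, (m0:Int) - 1 ≤ K → (K - ((m0:Int)-1)).toNat = d →
        aOuter number (PySem.List.pyRange K 0 (-1)) = some ((Nat.find hwit : Nat) : Int) := by
      intro d
      induction d with
      | zero =>
        intro K hKge hKd
        have hKeq : K = (m0:Int) - 1 := by omega
        subst hKeq
        rw [PySem.List.pyRange_neg_one_cons (by omega)]
        simp only [aOuter]
        have hiff := aSearch_iff (show (1:Int) ≤ (m0:Int)-1 by omega) (number.toNat+2) 2 number
          (le_refl 2) (le_refl number) (by omega)
          (fun c hc2 hcn _ => ⟨hc2, hcn⟩) ((Nat.find hwit : Nat) : Int)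
        rw [show (((m0:Int)-1)+1).toNat = m0 by omega] at hiff
        rw [hiff.mpr ⟨by omega, by omega, hGm0⟩]
      | succ d ihd =>
        intro K hKge hKd
        rw [PySem.List.pyRange_neg_one_cons (by omega)]
        simp only [aOuter]
        have hnone : aSearch (number.toNat+2) K 2 number number = none := by
          cases hres : aSearch (number.toNat+2) K 2 number number with
          | none => rfl
          | some c =>
            exfalso
            have hiff := aSearch_iff (show (1:Int) ≤ K by omega) (number.toNat+2) 2 number
              (le_refl 2) (le_refl number) (by omega)
              (fun c hc2 hcn _ => ⟨hc2, hcn⟩) c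
            obtain ⟨hc2, hcn, hGc⟩ := hiff.mp hres
            have := hmax c (K+1).toNat hc2 (by omega) hGc
            omega
        rw [hnone]
        exact ihd (K-1) (by omega) (by omega)
    exact main _ _ hK rfl
  -- ===== B returns some bmin =====
  have hB : get_min_base_alt number = some ((Nat.find hwit : Nat) : Int) := by
    unfold get_min_base_alt
    have main : ∀ fuel (b : Int), 2 ≤ b → b ≤ ((Nat.find hwit : Nat) : Int) →
        (∀ c : Int, 2 ≤ c → c < b → ¬∃ m : Nat, G m c = number) →
        (((Nat.find hwit : Nat) : Int) + 1 - b).toNat < fuel →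
        bLoop fuel b number = some ((Nat.find hwit : Nat) : Int) := by
      intro fuel
      induction fuel with
      | zero => intro b _ _ _ h; omega
      | succ fuel ih =>
        intro b hb2' hbb hnorep hfuel
        simp only [bLoop]
        by_cases hguard : b * b < number
        · rw [if_pos hguard]
          have hchk := bCheck_iff hb2' (number.toNat+1) number (by omega) (by omega)
          by_cases hex : ∃ m : Nat, G m b = number
          · rw [if_pos (hchk.mpr hex)]
            obtain ⟨m, hm⟩ := hex
            have hm2 : 2 ≤ m := by
              match m with
              | 0 => exfalso; simp [G] at hm; omega
              | 1 => exfalso; simp [G] at hm; omega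
              | m+2 => omega
            have := hmin b hb2' ⟨m, hm2, hm⟩
            congr 1
            omega
          · have hfalse : bCheck (number.toNat+1) number b = false := by
              cases hc : bCheck (number.toNat+1) number b with
              | false => rfl
              | true => exact absurd (hchk.mp hc) hex
            rw [hfalse, if_neg (by simp)]
            have hbne : b ≠ ((Nat.find hwit : Nat) : Int) := by
              intro h
              exact hex ⟨m0, by rw [h]; exact hGm0⟩
            apply ih (b+1) (by omega) (by omega) ?_ (by omega)
            intro c hc2 hcb hexc
            rcases (by omega : c < b ∨ c = b) with h | h
            · exact hnorep c hc2 h hexc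
            · rw [h] at hexc; exact hex hexc
        · rw [if_neg hguard, if_pos (by omega : (3:Int) ≤ number)]
          have hbm2 : b * b ≤ ((Nat.find hwit : Nat) : Int) * ((Nat.find hwit : Nat) : Int) := by
            nlinarith
          have hm0lt : ¬ (3 ≤ m0) := by
            intro h
            have h1 : G 3 ((Nat.find hwit : Nat) : Int) ≤ G m0 ((Nat.find hwit : Nat) : Int) :=
              G_le_m (by omega) h
            have h2 : G 3 ((Nat.find hwit : Nat) : Int) =
                ((Nat.find hwit : Nat) : Int) * ((Nat.find hwit : Nat) : Int) +
                ((Nat.find hwit : Nat) : Int) + 1 := by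
              show ((0 * _ + 1) * _ + 1) * _ + 1 = _
              ring
            omega
          have hm0eq : m0 = 2 := by omega
          rw [hm0eq, G_two] at hGm0
          congr 1
          omega
    apply main (number.toNat + 2) 2 (le_refl 2) (by omega) ?_ (by omega)
    intro c hc2 hcb
    omega
  rw [hA, hB]

-- ===== VERDICT (by name: the statement is the Claim_ definition above) =====
theorem get_min_base_spec : Claim_equal_get_min_base := by
  intro number hdom hpre
  unfold Spec_get_min_base
  unfold Pre_get_min_base at hpre
  rcases (by omega : number = 1 ∨ number = 2 ∨ 3 ≤ number) with rfl | rfl | h3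
  · decide
  · decide
  · exact case3 h3
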